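-- pv_equiv track=rewrite | github.com/Soliloquiess/Python_PS | 프로그래머스/0/181867. x 사이의 개수/x 사이의 개수.py | solution
-- ===== SOURCE A (Python) =====
-- def solution(myString):
--     lengths = []
--     count = 0
--
--     for ch in myString:
--         if ch == 'x':
--             lengths.append(count)
--             count = 0
--         else:
--             count += 1
--     lengths.append(count)  # 마지막 구간 길이 추가
--
--     return lengths
-- ===== SOURCE B (Python) =====
-- def solution(myString):
--     return [len(seg) for seg in myString.split('x')]
-- ===== Notes on version B (the rewrite author's own statement) =====
-- stated objective: idiomatic
-- what changed: Replaces the manual character-by-character counter loop with a two-stage split('x') then map-len decomposition, letting the C-level str.split do the scan.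
import Mathlib
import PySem

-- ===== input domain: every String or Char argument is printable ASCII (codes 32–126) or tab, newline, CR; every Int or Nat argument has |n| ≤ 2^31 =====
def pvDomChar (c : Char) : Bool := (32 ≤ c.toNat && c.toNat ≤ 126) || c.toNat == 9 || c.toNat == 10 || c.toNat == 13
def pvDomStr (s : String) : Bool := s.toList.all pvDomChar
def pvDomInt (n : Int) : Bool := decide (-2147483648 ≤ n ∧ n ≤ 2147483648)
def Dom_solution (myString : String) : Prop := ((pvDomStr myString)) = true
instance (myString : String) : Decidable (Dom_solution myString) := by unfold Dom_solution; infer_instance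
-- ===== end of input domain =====

-- B replaces A's running character counter with an idiomatic split('x') followed by mapping len.

-- ===== PORT A =====
-- literal port of A: one pass with (lengths, count) accumulator, final append of count
def solution (myString : String) : List Int :=
  let r := myString.toList.foldl
    (fun (p : List Int × Int) ch => if ch == 'x' then (p.1 ++ [p.2], 0) else (p.1, p.2 + 1))
    ([], 0)
  r.1 ++ [r.2]

-- ===== PORT B =====
-- literal port of Source B: myString.split('x') (PySem.Chars.splitOn is split with a nonempty sep), then map len
def solution_alt (myString : String) : List Int :=
  (PySem.Chars.splitOn myString.toList ['x']).map (fun seg => (seg.length : Int))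

-- ===== PRECONDITION & SPEC =====
def Spec_solution (myString : String) (out : List Int) : Prop := out = solution_alt myString
instance (myString : String) (out : List Int) : Decidable (Spec_solution myString out) := by unfold Spec_solution; infer_instance

-- ===== CLAIM (what is proved, stated in full; the proofs are below) =====
def Claim_equal_solution : Prop := ∀ (myString : String), Dom_solution myString → Spec_solution myString (solution myString)

-- ===== LEMMAS AND PROOFS =====

-- reference shape of split-on-'x' segments carried with the current (reversed) segment
def pvSegs : List Char → List Char → List (List Char)
  | [], cur => [cur.reverse]
  | c :: rest, cur => if c == 'x' then cur.reverse :: pvSegs rest [] else pvSegs rest (c :: cur)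

theorem pvGo_eq (l : List Char) : ∀ (fuel : Nat) (cur : List Char) (acc : List (List Char)),
    l.length < fuel →
    PySem.Chars.splitOn.go ['x'] fuel l cur acc = acc.reverse ++ pvSegs l cur := by
  induction l with
  | nil =>
    intro fuel cur acc h
    match fuel, h with
    | fuel + 1, _ => simp [PySem.Chars.splitOn.go, pvSegs]
  | cons c rest ih =>
    intro fuel cur acc h
    match fuel, h with
    | fuel + 1, h =>
      have hlt : rest.length < fuel := by simpa using Nat.lt_of_succ_lt_succ h
      by_cases hc : c = 'x'
      · subst hc
        rw [show PySem.Chars.splitOn.go ['x'] (fuel + 1) ('x' :: rest) cur acc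
              = PySem.Chars.splitOn.go ['x'] fuel rest [] (cur.reverse :: acc) by
            simp [PySem.Chars.splitOn.go, List.isPrefixOf]]
        rw [ih fuel [] (cur.reverse :: acc) hlt]
        simp [pvSegs]
      · rw [show PySem.Chars.splitOn.go ['x'] (fuel + 1) (c :: rest) cur acc
              = PySem.Chars.splitOn.go ['x'] fuel rest (c :: cur) acc by
            simp only [PySem.Chars.splitOn.go, List.isPrefixOf]
            rw [if_neg (by simp; intro h; exact absurd h.symm hc)]]
        rw [ih fuel (c :: cur) acc hlt]
        simp [pvSegs, hc]

theorem pvSplitOn_eq (s : List Char) : PySem.Chars.splitOn s ['x'] = pvSegs s [] := by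
  rw [PySem.Chars.splitOn, pvGo_eq s (s.length + 1) [] [] (Nat.lt_succ_self _)]
  simp

theorem pvFold_eq (cs : List Char) : ∀ (lengths : List Int) (cur : List Char),
    (cs.foldl
        (fun (p : List Int × Int) ch => if ch == 'x' then (p.1 ++ [p.2], 0) else (p.1, p.2 + 1))
        (lengths, (cur.length : Int))).1
      ++ [(cs.foldl
        (fun (p : List Int × Int) ch => if ch == 'x' then (p.1 ++ [p.2], 0) else (p.1, p.2 + 1))
        (lengths, (cur.length : Int))).2]
    = lengths ++ (pvSegs cs cur).map (fun seg => (seg.length : Int)) := by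
  induction cs with
  | nil => intro lengths cur; simp [pvSegs]
  | cons c rest ih =>
    intro lengths cur
    simp only [List.foldl_cons]
    by_cases hc : c = 'x'
    · subst hc
      rw [if_pos (by simp)]
      have h := ih (lengths ++ [(cur.length : Int)]) []
      simp only [List.length_nil, Nat.cast_zero] at h
      rw [h]
      simp [pvSegs]
    · rw [if_neg (by simp [hc])]
      have h := ih lengths (c :: cur)
      simp only [List.length_cons] at h
      push_cast at h ⊢
      rw [h]
      simp [pvSegs, hc]

-- ===== VERDICT (by name: the statement is the Claim_ definition above) =====
theorem solution_spec : Claim_equal_solution := by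
  intro s _
  unfold Spec_solution solution solution_alt
  rw [pvSplitOn_eq]
  simpa using pvFold_eq s.toList [] []
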